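-- pv_equiv track=rewrite | github.com/MUKUL-PRASAD-SIGH/X-FORECAST | src/models/governance/fqi_calculator.py | _are_hierarchically_related
-- ===== SOURCE A (Python) =====
-- def _are_hierarchically_related(upper_key: str, lower_key: str) -> bool:
--     """Check if two forecast keys are hierarchically related"""
--
--     upper_parts = upper_key.split('_')
--     lower_parts = lower_key.split('_')
--
--     # Lower level should have more parts and contain all upper level parts
--     if len(lower_parts) <= len(upper_parts):
--         return False
--
--     # Check if lower key starts with upper key components
--     for i, upper_part in enumerate(upper_parts):
--         if i >= len(lower_parts) or upper_part != lower_parts[i]: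
--             return False
--
--     return True
-- ===== SOURCE B (Python) =====
-- def _are_hierarchically_related(upper_key: str, lower_key: str) -> bool:
--     # A split-segment prefix with strictly more segments is exactly a raw-string
--     # prefix ending at an underscore boundary.
--     return lower_key.startswith(upper_key + '_')
-- ===== Notes on version B (the rewrite author's own statement) =====
-- stated objective: simpler
-- what changed: Replaces splitting both keys into '_'-part lists and an indexed comparison loop with a single raw-string prefix test lower_key.startswith(upper_key + '_'), whose trailing underscore enforces the segment boundary and the strict part-count condition at once.
import Mathlib
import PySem

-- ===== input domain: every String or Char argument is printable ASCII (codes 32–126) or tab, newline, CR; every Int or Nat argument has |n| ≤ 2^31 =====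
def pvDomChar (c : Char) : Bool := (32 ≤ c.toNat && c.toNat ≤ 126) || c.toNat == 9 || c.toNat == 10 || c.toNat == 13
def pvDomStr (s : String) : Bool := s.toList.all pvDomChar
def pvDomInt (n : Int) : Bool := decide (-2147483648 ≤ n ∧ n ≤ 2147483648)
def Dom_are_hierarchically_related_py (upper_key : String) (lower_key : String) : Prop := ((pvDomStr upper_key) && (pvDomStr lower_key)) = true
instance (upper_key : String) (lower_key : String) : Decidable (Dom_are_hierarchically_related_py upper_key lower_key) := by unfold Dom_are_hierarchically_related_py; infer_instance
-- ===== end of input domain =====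

-- B replaces A's split-into-parts + indexed loop by one raw-string prefix test (simpler).

-- ===== PORT A =====
-- the 'for i, upper_part in enumerate(upper_parts): …' loop with its two-way early return
def ahrLoop (lower_parts : List (List Char)) : List (Int × List Char) → Bool
  | [] => true
  | (i, upper_part) :: rest =>
      if (lower_parts.length : Int) ≤ i then false
      else if PySem.List.pyGet? lower_parts i ≠ some upper_part then false
      else ahrLoop lower_parts rest

def are_hierarchically_related_py (upper_key : String) (lower_key : String) : Bool :=
  let upper_parts := PySem.Chars.splitOn upper_key.toList ['_']
  let lower_parts := PySem.Chars.splitOn lower_key.toList ['_']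
  if lower_parts.length ≤ upper_parts.length then false
  else ahrLoop lower_parts (PySem.List.enumerate upper_parts)

-- ===== PORT B =====
def are_hierarchically_related_py_alt (upper_key : String) (lower_key : String) : Bool :=
  PySem.Chars.startswith lower_key.toList (upper_key.toList ++ ['_'])

-- ===== PRECONDITION & SPEC =====
def Spec_are_hierarchically_related_py (upper_key : String) (lower_key : String) (out : Bool) : Prop := out = are_hierarchically_related_py_alt upper_key lower_key
instance (upper_key : String) (lower_key : String) (out : Bool) : Decidable (Spec_are_hierarchically_related_py upper_key lower_key out) := by unfold Spec_are_hierarchically_related_py; infer_instance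

-- ===== CLAIM (what is proved, stated in full; the proofs are below) =====
def Claim_equal_are_hierarchically_related_py : Prop := ∀ (upper_key : String) (lower_key : String), Dom_are_hierarchically_related_py upper_key lower_key → Spec_are_hierarchically_related_py upper_key lower_key (are_hierarchically_related_py upper_key lower_key)

-- ===== LEMMAS AND PROOFS =====

-- a simple structural model of split('_')
def mySplit : List Char → List (List Char)
  | [] => [[]]
  | c :: r => if c = '_' then [] :: mySplit r
              else (c :: (mySplit r).headI) :: (mySplit r).tail

theorem mySplit_ne_nil (s : List Char) : mySplit s ≠ [] := by
  cases s with
  | nil => simp [mySplit]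
  | cons c r => simp only [mySplit]; split <;> simp

def firstCons (p : List Char) : List (List Char) → List (List Char)
  | [] => [p]
  | q :: qs => (p ++ q) :: qs

theorem splitOn_go_underscore (fuel : Nat) (l cur : List Char) (acc : List (List Char))
    (h : l.length ≤ fuel) :
    PySem.Chars.splitOn.go ['_'] fuel l cur acc = acc.reverse ++ firstCons cur.reverse (mySplit l) := by
  induction fuel generalizing l cur acc with
  | zero =>
      have : l = [] := by cases l <;> simp_all
      subst this
      rw [PySem.Chars.splitOn.go.eq_def]
      simp [mySplit, firstCons]
  | succ f ih =>
      cases l with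
      | nil =>
          rw [PySem.Chars.splitOn.go.eq_def]
          simp [mySplit, firstCons]
      | cons c rest =>
          rw [PySem.Chars.splitOn.go.eq_def]
          simp only []
          by_cases hc : c = '_'
          · subst hc
            have hpre : List.isPrefixOf ['_'] ('_' :: rest) = true := by
              simp [List.isPrefixOf]
            simp only [hpre, if_true, List.length_cons, List.length_nil, List.drop_succ_cons,
              List.drop_zero, Nat.zero_add]
            rw [ih rest [] (cur.reverse :: acc) (by simpa using Nat.le_of_succ_le_succ h)]
            obtain ⟨q, qs, hq⟩ : ∃ q qs, mySplit rest = q :: qs := by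
              cases hms : mySplit rest with
              | nil => exact absurd hms (mySplit_ne_nil rest)
              | cons q qs => exact ⟨q, qs, rfl⟩
            simp [mySplit, firstCons, hq]
          · have hpre : List.isPrefixOf ['_'] (c :: rest) = false := by
              simp only [List.isPrefixOf, Bool.and_eq_false_iff, beq_eq_false_iff_ne]
              exact Or.inl (fun h => hc h.symm)
            simp only [hpre, Bool.false_eq_true, if_false]
            rw [ih rest (c :: cur) acc (by simpa using Nat.le_of_succ_le_succ h)]
            obtain ⟨q, qs, hq⟩ : ∃ q qs, mySplit rest = q :: qs := by
              cases hms : mySplit rest with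
              | nil => exact absurd hms (mySplit_ne_nil rest)
              | cons q qs => exact ⟨q, qs, rfl⟩
            simp [mySplit, firstCons, hq, hc]

theorem splitOn_underscore (s : List Char) : PySem.Chars.splitOn s ['_'] = mySplit s := by
  unfold PySem.Chars.splitOn
  rw [splitOn_go_underscore s.length.succ s [] [] (Nat.le_succ _)]
  obtain ⟨q, qs, hq⟩ : ∃ q qs, mySplit s = q :: qs := by
    cases hms : mySplit s with
    | nil => exact absurd hms (mySplit_ne_nil s)
    | cons q qs => exact ⟨q, qs, rfl⟩
  simp [firstCons, hq]

-- the loop is a prefix check on the remaining parts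
theorem ahrLoop_eq (up lo : List (List Char)) (k : Nat) :
    ahrLoop lo (PySem.List.enumerate up (k : Int)) = up.isPrefixOf (lo.drop k) := by
  induction up generalizing k with
  | nil => simp [PySem.List.enumerate, ahrLoop, List.isPrefixOf]
  | cons p rest ih =>
      simp only [PySem.List.enumerate, ahrLoop]
      by_cases hk : lo.length ≤ k
      · rw [if_pos (by exact_mod_cast hk)]
        rw [List.drop_eq_nil_of_le hk]
        simp [List.isPrefixOf]
      · rw [Nat.not_le] at hk
        rw [if_neg (by omega)]
        have hget : PySem.List.pyGet? lo (k : Int) = some lo[k] := by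
          simp [PySem.List.pyGet?_natCast, List.getElem?_eq_getElem hk]
        have hdrop : lo.drop k = lo[k] :: lo.drop (k + 1) :=
          List.drop_eq_getElem_cons hk
        rw [hget, hdrop]
        by_cases hp : p = lo[k]
        · subst hp
          rw [if_neg (by simp)]
          have : ((k : Int) + 1) = ((k + 1 : Nat) : Int) := by push_cast; ring
          rw [this, ih (k + 1)]
          simp [List.isPrefixOf]
        · rw [if_pos (by simp [Ne.symm hp])]
          simp [List.isPrefixOf, hp]

-- the heart: raw-string prefix with '_' appended = parts prefix + strictly more parts
theorem key_lemma (u l : List Char) :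
    List.isPrefixOf (u ++ ['_']) l =
      ((mySplit u).isPrefixOf (mySplit l) && decide ((mySplit u).length < (mySplit l).length)) := by
  induction u generalizing l with
  | nil =>
      cases l with
      | nil => simp [mySplit, List.isPrefixOf]
      | cons d r =>
          by_cases hd : d = '_'
          · subst hd
            have hlen := List.length_pos_iff.mpr (mySplit_ne_nil r)
            simp [mySplit, List.isPrefixOf]
            omega
          · obtain ⟨q, qs, hq⟩ : ∃ q qs, mySplit r = q :: qs := by
              cases hms : mySplit r with
              | nil => exact absurd hms (mySplit_ne_nil r)
              | cons q qs => exact ⟨q, qs, rfl⟩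
            simp [mySplit, hd, hq, List.isPrefixOf, Ne.symm hd]
  | cons c u' ih =>
      cases l with
      | nil =>
          obtain ⟨q, qs, hq⟩ : ∃ q qs, mySplit u' = q :: qs := by
            cases hms : mySplit u' with
            | nil => exact absurd hms (mySplit_ne_nil u')
            | cons q qs => exact ⟨q, qs, rfl⟩
          by_cases hc : c = '_' <;> simp [mySplit, hc, hq, List.isPrefixOf]
      | cons d r =>
          obtain ⟨q, qs, hq⟩ : ∃ q qs, mySplit u' = q :: qs := by
            cases hms : mySplit u' with
            | nil => exact absurd hms (mySplit_ne_nil u')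
            | cons q qs => exact ⟨q, qs, rfl⟩
          obtain ⟨p, ps, hp⟩ : ∃ p ps, mySplit r = p :: ps := by
            cases hms : mySplit r with
            | nil => exact absurd hms (mySplit_ne_nil r)
            | cons p ps => exact ⟨p, ps, rfl⟩
          by_cases hc : c = '_' <;> by_cases hd : d = '_'
          · subst hc; subst hd
            simp only [List.cons_append, List.isPrefixOf, mySplit, if_pos rfl]
            rw [ih r]
            simp
          · subst hc
            simp [mySplit, hd, hq, hp, List.isPrefixOf, Ne.symm hd]
          · subst hd
            simp [mySplit, hc, hq, List.isPrefixOf]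
          · by_cases hcd : c = d
            · subst hcd
              simp only [List.cons_append, List.isPrefixOf, mySplit, if_neg hc, hq, hp,
                List.headI, List.tail_cons, beq_self_eq_true, Bool.true_and]
              have := ih r
              rw [hq, hp] at this
              simpa [List.isPrefixOf] using this
            · have hb : (c == d) = false := by simp [hcd]
              simp [mySplit, hc, hd, hq, hp, List.isPrefixOf, hb]

-- ===== VERDICT (by name: the statement is the Claim_ definition above) =====
theorem are_hierarchically_related_py_spec : Claim_equal_are_hierarchically_related_py := by
  intro upper_key lower_key _
  unfold Spec_are_hierarchically_related_py
  unfold are_hierarchically_related_py are_hierarchically_related_py_alt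
  simp only [splitOn_underscore]
  rw [show ((0 : Int) = ((0 : Nat) : Int)) from rfl, ahrLoop_eq _ _ 0, List.drop_zero]
  have hk := key_lemma upper_key.toList lower_key.toList
  simp only [PySem.Chars.startswith]
  rw [hk]
  by_cases hlen : (mySplit lower_key.toList).length ≤ (mySplit upper_key.toList).length
  · rw [if_pos hlen]
    simp [Nat.not_lt_of_le hlen]
  · rw [if_neg hlen]
    rw [Nat.not_le] at hlen
    simp [hlen]
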